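-- pv_equiv track=rewrite | github.com/gsornsen/mycelium | src/mycelium/mcp/checksums.py | _extract_agent_name
-- ===== SOURCE A (Python) =====
-- def _extract_agent_name(filename: str) -> str:
--     """Extract agent name from filename.
--
--     Removes .md extension and number/category prefix.
--
--     Examples:
--         "01-core-backend-developer.md" -> "backend-developer"
--         "02-language-python-pro.md" -> "python-pro"
--
--     Args:
--         filename: Agent filename
--
--     Returns:
--         Cleaned agent name
--     """
--     # Remove .md extension
--     name = filename.removesuffix(".md")
--
--     # Remove number prefix (e.g., "01-")
--     parts = name.split("-", maxsplit=1)
--     if len(parts) == 2 and parts[0].isdigit():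
--         name = parts[1]
--
--     # Remove category prefix (e.g., "core-")
--     # Common categories: core, language, specialized, data, developer, etc.
--     categories = [
--         "core",
--         "language",
--         "specialized",
--         "data",
--         "developer",
--         "business",
--         "devops",
--         "infrastructure",
--         "security",
--     ]
--
--     for category in categories:
--         prefix = f"{category}-"
--         if name.startswith(prefix):
--             name = name.removeprefix(prefix)
--             break
--
--     return name
-- ===== SOURCE B (Python) =====
-- CATEGORIES = {
--     "core", "language", "specialized", "data", "developer",
--     "business", "devops", "infrastructure", "security",
-- }
--
--
-- def _extract_agent_name(filename: str) -> str:
--     name = filename.removesuffix(".md")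
--     parts = name.split("-", maxsplit=1)
--     if len(parts) == 2 and parts[0].isdigit():
--         name = parts[1]
--     head, sep, tail = name.partition("-")
--     if sep and head in CATEGORIES:
--         name = tail
--     return name
-- ===== Notes on version B (the rewrite author's own statement) =====
-- stated objective: idiomatic
-- what changed: The category-stripping for-loop over nine startswith/removeprefix probes is replaced by one str.partition at the first hyphen followed by a single set-membership test on the leading token.
import Mathlib
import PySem

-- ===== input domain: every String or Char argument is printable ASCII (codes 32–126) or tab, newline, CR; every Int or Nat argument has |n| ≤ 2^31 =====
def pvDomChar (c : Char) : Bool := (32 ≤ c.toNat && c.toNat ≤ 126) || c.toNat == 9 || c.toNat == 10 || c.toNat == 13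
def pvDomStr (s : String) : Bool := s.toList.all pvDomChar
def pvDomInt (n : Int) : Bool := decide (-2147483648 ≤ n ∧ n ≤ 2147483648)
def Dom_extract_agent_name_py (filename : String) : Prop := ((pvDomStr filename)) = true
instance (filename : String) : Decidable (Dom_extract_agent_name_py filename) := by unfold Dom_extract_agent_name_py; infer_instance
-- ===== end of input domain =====

-- B replaces the nine-way startswith loop for the category prefix by one str.partition at the first hyphen
-- plus a set-membership test on the first token (idiomatic; return value proved equal).


-- ===== PORT A =====
-- s.removesuffix(suf): exact hand port (PySem has no removesuffix)
def pyRemoveSuffix (s suf : List Char) : List Char :=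
  if PySem.Chars.endswith s suf then s.take (s.length - suf.length) else s

-- name.split("-", maxsplit=1) + digit-prefix drop, shared wording of A's first two steps
def stripNumPrefix (s : List Char) : List Char :=
  match PySem.Chars.splitOnMax s ['-'] 1 with
  | [a, b] => if PySem.Chars.strIsdigit a then b else s
  | _ => s

-- A's for-loop over the category list: first matching "cat-" prefix is removed, then break
def catLoop : List (List Char) → List Char → List Char
  | [], name => name
  | c :: cs, name =>
    let pre := c ++ ['-']
    if PySem.Chars.startswith name pre then name.drop pre.length else catLoop cs name

def pyCategories : List (List Char) :=
  ["core".toList, "language".toList, "specialized".toList, "data".toList,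
   "developer".toList, "business".toList, "devops".toList,
   "infrastructure".toList, "security".toList]

def extract_agent_name_py (filename : String) : String :=
  let name := pyRemoveSuffix filename.toList ".md".toList
  let name := stripNumPrefix name
  String.ofList (catLoop pyCategories name)

-- ===== PORT B =====
-- s.partition(c) for a single-character separator: exact hand port
def pyPartitionChar (s : List Char) (c : Char) : List Char × List Char × List Char :=
  match s with
  | [] => ([], [], [])
  | x :: xs =>
    if x = c then ([], [c], xs)
    else
      let r := pyPartitionChar xs c
      (x :: r.1, r.2.1, r.2.2)

-- B's CATEGORIES set literal (all elements distinct)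
def CATEGORIES : PySem.Set (List Char) :=
  PySem.Set.ofList
    ["core".toList, "language".toList, "specialized".toList, "data".toList,
     "developer".toList, "business".toList, "devops".toList,
     "infrastructure".toList, "security".toList]

def extract_agent_name_py_alt (filename : String) : String :=
  let name := pyRemoveSuffix filename.toList ".md".toList
  let name := stripNumPrefix name
  let r := pyPartitionChar name '-'
  let name := if r.2.1 ≠ [] ∧ r.1 ∈ CATEGORIES then r.2.2 else name
  String.ofList name

-- ===== PRECONDITION & SPEC =====
def Spec_extract_agent_name_py (filename : String) (out : String) : Prop := out = extract_agent_name_py_alt filename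
instance (filename : String) (out : String) : Decidable (Spec_extract_agent_name_py filename out) := by unfold Spec_extract_agent_name_py; infer_instance

-- ===== CLAIM (what is proved, stated in full; the proofs are below) =====
def Claim_equal_extract_agent_name_py : Prop := ∀ (filename : String), Dom_extract_agent_name_py filename → Spec_extract_agent_name_py filename (extract_agent_name_py filename)

-- ===== LEMMAS AND PROOFS =====

-- partChar characterization
theorem pyPartitionChar_spec (s : List Char) (c : Char) :
    (c ∉ s ∧ pyPartitionChar s c = (s, [], [])) ∨
    (∃ h t, c ∉ h ∧ s = h ++ c :: t ∧ pyPartitionChar s c = (h, [c], t)) := by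
  induction s with
  | nil => left; simp [pyPartitionChar]
  | cons x xs ih =>
    by_cases hx : x = c
    · right; exact ⟨[], xs, by simp, by simp [hx], by simp [pyPartitionChar, hx]⟩
    · rcases ih with ⟨hm, he⟩ | ⟨h, t, hm, hs, he⟩
      · left
        refine ⟨?_, by simp [pyPartitionChar, hx, he]⟩
        simp [hm]
        exact fun e => hx e.symm
      · right
        refine ⟨x :: h, t, ?_, by simp [hs], by simp [pyPartitionChar, hx, he]⟩
        simp [hm]
        exact fun e => hx e.symm

theorem prefix_hyphen (c h t : List Char) (hc : '-' ∉ c) (hh : '-' ∉ h) :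
    (c ++ ['-']) <+: (h ++ '-' :: t) ↔ c = h := by
  induction c generalizing h with
  | nil =>
    cases h with
    | nil => simp
    | cons b h' =>
      simp only [List.nil_append]
      constructor
      · intro hp
        rcases hp with ⟨r, hr⟩
        simp at hr
        exact absurd (by rw [← hr.1]; exact List.mem_cons_self) hh
      · intro he; simp at he
  | cons a c' ih =>
    cases h with
    | nil =>
      simp only [List.nil_append]
      constructor
      · intro hp
        rcases hp with ⟨r, hr⟩
        simp at hr
        exact absurd (by rw [hr.1]; exact List.mem_cons_self) hc
      · intro he; simp at he
    | cons b h' =>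
      have hc' : '-' ∉ c' := fun m => hc (List.mem_cons_of_mem _ m)
      have hh' : '-' ∉ h' := fun m => hh (List.mem_cons_of_mem _ m)
      constructor
      · intro hp
        rcases hp with ⟨r, hr⟩
        simp at hr
        obtain ⟨hab, hrest⟩ := hr
        have : (c' ++ ['-']) <+: (h' ++ '-' :: t) := ⟨r, by simpa using hrest⟩
        simp [hab, (ih h' hc' hh').mp this]
      · intro he
        rw [he]
        exact ⟨t, by simp⟩

theorem startswith_no_hyphen (s c : List Char) (hs : '-' ∉ s) :
    PySem.Chars.startswith s (c ++ ['-']) = false := by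
  rw [Bool.eq_false_iff]
  intro hb
  have : (c ++ ['-']) <+: s := (PySem.Chars.startswith_iff _ _).mp hb
  exact hs (this.subset (by simp))

theorem catLoop_no_hyphen (cats : List (List Char)) (s : List Char) (hs : '-' ∉ s) :
    catLoop cats s = s := by
  induction cats with
  | nil => rfl
  | cons c cs ih => simp [catLoop, startswith_no_hyphen s c hs, ih]

theorem catLoop_split (cats : List (List Char)) (h t : List Char)
    (hh : '-' ∉ h) (hc : ∀ c ∈ cats, '-' ∉ c) :
    catLoop cats (h ++ '-' :: t) = if h ∈ cats then t else h ++ '-' :: t := by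
  induction cats with
  | nil => simp [catLoop]
  | cons c cs ih =>
    have hcc : '-' ∉ c := hc c List.mem_cons_self
    have ih' := ih (fun d hd => hc d (List.mem_cons_of_mem _ hd))
    by_cases he : c = h
    · subst he
      have hsw : PySem.Chars.startswith (c ++ '-' :: t) (c ++ ['-']) = true :=
        (PySem.Chars.startswith_iff _ _).mpr ((prefix_hyphen c c t hcc hh).mpr rfl)
      simp [catLoop, hsw]
    · have hsw : PySem.Chars.startswith (h ++ '-' :: t) (c ++ ['-']) = false := by
        rw [Bool.eq_false_iff]
        intro hb
        exact he ((prefix_hyphen c h t hcc hh).mp ((PySem.Chars.startswith_iff _ _).mp hb))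
      have hne : ¬ h = c := fun e => he e.symm
      simp [catLoop, hsw, ih', hne]

theorem main_core (name : List Char) :
    catLoop pyCategories name =
      (let r := pyPartitionChar name '-'
       if r.2.1 ≠ [] ∧ r.1 ∈ CATEGORIES then r.2.2 else name) := by
  rcases pyPartitionChar_spec name '-' with ⟨hm, he⟩ | ⟨h, t, hm, hs, he⟩
  · simp only [he]
    simp [catLoop_no_hyphen pyCategories name hm]
  · subst hs
    simp only [he]
    have hcats : ∀ c ∈ pyCategories, '-' ∉ c := by decide
    rw [catLoop_split pyCategories h t hm hcats]
    have hmem : (h ∈ CATEGORIES) ↔ (h ∈ pyCategories) := by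
      simp [CATEGORIES, pyCategories, PySem.Set.mem_ofList]
    by_cases hin : h ∈ pyCategories
    · simp [hin, hmem.mpr hin]
    · have : h ∉ CATEGORIES := fun hc2 => hin (hmem.mp hc2)
      simp [hin, this]

-- ===== VERDICT (by name: the statement is the Claim_ definition above) =====
theorem extract_agent_name_py_spec : Claim_equal_extract_agent_name_py := by
  intro filename _
  show extract_agent_name_py filename = extract_agent_name_py_alt filename
  unfold extract_agent_name_py extract_agent_name_py_alt
  simp only [main_core]
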